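-- pv_equiv track=rewrite | github.com/G1ART/GenAIProacTrade | src/phase47_runtime/governed_conversation.py | _copilot_context_markdown_prefix
-- ===== SOURCE A (Python) =====
-- def _copilot_context_markdown_prefix(ctx: dict[str, str]) -> str:
--     if not ctx:
--         return ""
--     order = [
--         "source",
--         "asset_id",
--         "horizon",
--         "horizon_label",
--         "spectrum_band",
--         "spectrum_quintile",
--         "spectrum_position",
--         "rank_index",
--         "rank_movement",
--         "active_model_family",
--         "as_of_utc",
--         "headline",
--         "message_summary",
--         "valuation_tension",
--         "why_now",
--         "what_to_watch",
--         "what_remains_unproven",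
--         "replay_lineage_pointer",
--         "message_snapshot_id",
--         "linked_registry_entry_id",
--         "linked_artifact_id",
--         "challenger_hint",
--     ]
--     lines = ["## Copilot context (UI)", ""]
--     seen: set[str] = set()
--     for k in order:
--         if k in ctx and ctx[k]:
--             label = k.replace("_", " ").title()
--             lines.append(f"- **{label}**: {ctx[k]}")
--             seen.add(k)
--     for k in sorted(ctx.keys()):
--         if k in seen or not ctx[k]:
--             continue
--         lines.append(f"- **{k}**: {ctx[k]}")
--     return "\n".join(lines) + "\n\n---\n\n"
-- ===== SOURCE B (Python) =====
-- ORDER = [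
--     "source",
--     "asset_id",
--     "horizon",
--     "horizon_label",
--     "spectrum_band",
--     "spectrum_quintile",
--     "spectrum_position",
--     "rank_index",
--     "rank_movement",
--     "active_model_family",
--     "as_of_utc",
--     "headline",
--     "message_summary",
--     "valuation_tension",
--     "why_now",
--     "what_to_watch",
--     "what_remains_unproven",
--     "replay_lineage_pointer",
--     "message_snapshot_id",
--     "linked_registry_entry_id",
--     "linked_artifact_id",
--     "challenger_hint",
-- ]
--
-- _RANK = {k: i for i, k in enumerate(ORDER)}
--
--
-- def _copilot_context_markdown_prefix(ctx: dict[str, str]) -> str: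
--     if not ctx:
--         return ""
--     keys = sorted(
--         (k for k in ctx if ctx[k]),
--         key=lambda k: (_RANK.get(k, len(ORDER)), k),
--     )
--     lines = ["## Copilot context (UI)", ""]
--     for k in keys:
--         label = k.replace("_", " ").title() if k in _RANK else k
--         lines.append(f"- **{label}**: {ctx[k]}")
--     return "\n".join(lines) + "\n\n---\n\n"
-- ===== Notes on version B (the rewrite author's own statement) =====
-- stated objective: simpler
-- what changed: Replaces A's two emission loops with a seen-set by a single sort of the truthy keys under the tuple key (rank.get(k, len(ORDER)), k) built from a precomputed rank dict, followed by one emission loop that picks the label style by rank membership.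
import Mathlib
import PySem

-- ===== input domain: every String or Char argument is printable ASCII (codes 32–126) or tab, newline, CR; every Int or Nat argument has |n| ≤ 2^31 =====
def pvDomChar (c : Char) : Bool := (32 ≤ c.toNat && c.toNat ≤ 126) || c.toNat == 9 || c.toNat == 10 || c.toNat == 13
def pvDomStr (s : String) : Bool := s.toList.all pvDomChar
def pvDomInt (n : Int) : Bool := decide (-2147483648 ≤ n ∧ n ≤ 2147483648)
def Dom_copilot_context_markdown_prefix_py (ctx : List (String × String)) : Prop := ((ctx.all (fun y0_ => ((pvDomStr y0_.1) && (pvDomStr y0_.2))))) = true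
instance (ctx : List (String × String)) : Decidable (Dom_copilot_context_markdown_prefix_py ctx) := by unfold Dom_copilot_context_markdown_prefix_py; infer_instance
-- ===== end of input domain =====

-- B replaces A's two emission loops (ordered pass with a seen set, then a sorted-rest pass)
-- by ONE sort of the truthy keys under the tuple key (rank.get(k, len(order)), k) from a
-- precomputed rank dict, followed by one emission loop; return values are proved equal.

-- ===== PORT A =====

-- the fixed `order` list
def pvOrder : List String :=
  ["source", "asset_id", "horizon", "horizon_label", "spectrum_band", "spectrum_quintile",
   "spectrum_position", "rank_index", "rank_movement", "active_model_family", "as_of_utc",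
   "headline", "message_summary", "valuation_tension", "why_now", "what_to_watch",
   "what_remains_unproven", "replay_lineage_pointer", "message_snapshot_id",
   "linked_registry_entry_id", "linked_artifact_id", "challenger_hint"]

-- hand port of str.title(), exact on the ASCII domain (there a character is cased iff it is a letter):
-- a letter is uppercased after a non-letter and lowercased after a letter; other characters are kept.
def pvTitle : List Char → Bool → List Char
  | [], _ => []
  | c :: rest, prev =>
      (if PySem.Chars.isalpha c then
          (if prev then PySem.Chars.lowerChar c else PySem.Chars.upperChar c)
        else c) :: pvTitle rest (PySem.Chars.isalpha c)

-- k.replace("_", " ").title()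
def pvLabel (k : String) : String :=
  String.ofList (pvTitle (PySem.Str.replace k "_" " ").toList false)

def copilot_context_markdown_prefix_py (ctx : List (String × String)) : String :=
  let d := PySem.Dict.ofList ctx
  if ctx.isEmpty then ""
  else
    let st := pvOrder.foldl
      (fun (st : List String × PySem.Set String) k =>
        if d.contains k && d.getD k "" != "" then
          (st.1 ++ ["- **" ++ pvLabel k ++ "**: " ++ d.getD k ""], PySem.Set.add st.2 k)
        else st)
      (["## Copilot context (UI)", ""], PySem.Set.empty)
    let lines := (PySem.List.sorted d.keys (fun x => x) false).foldl
      (fun ls k =>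
        if PySem.Set.contains st.2 k || d.getD k "" == "" then ls
        else ls ++ ["- **" ++ k ++ "**: " ++ d.getD k ""])
      st.1
    PySem.Str.join "\n" lines ++ "\n\n---\n\n"

-- ===== PORT B =====

-- _RANK = {k: i for i, k in enumerate(ORDER)}
def pvRank : PySem.Dict String Int :=
  (PySem.List.enumerate pvOrder).foldl (fun r p => r.insert p.2 p.1) PySem.Dict.empty

def copilot_context_markdown_prefix_py_alt (ctx : List (String × String)) : String :=
  let d := PySem.Dict.ofList ctx
  if ctx.isEmpty then ""
  else
    let keys := PySem.List.sorted2 (d.keys.filter (fun k => d.getD k "" != ""))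
      (fun k => pvRank.getD k (pvOrder.length : Int)) (fun k => k) false
    let lines := keys.foldl
      (fun ls k =>
        ls ++ ["- **" ++ (if pvRank.contains k then pvLabel k else k) ++ "**: " ++ d.getD k ""])
      ["## Copilot context (UI)", ""]
    PySem.Str.join "\n" lines ++ "\n\n---\n\n"

-- ===== PRECONDITION & SPEC =====
def Spec_copilot_context_markdown_prefix_py (ctx : List (String × String)) (out : String) : Prop := out = copilot_context_markdown_prefix_py_alt ctx
instance (ctx : List (String × String)) (out : String) : Decidable (Spec_copilot_context_markdown_prefix_py ctx out) := by unfold Spec_copilot_context_markdown_prefix_py; infer_instance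

-- ===== CLAIM (what is proved, stated in full; the proofs are below) =====
def Claim_equal_copilot_context_markdown_prefix_py : Prop := ∀ (ctx : List (String × String)), Dom_copilot_context_markdown_prefix_py ctx → Spec_copilot_context_markdown_prefix_py ctx (copilot_context_markdown_prefix_py ctx)

-- ===== LEMMAS AND PROOFS =====

-- A's first loop: collects the bullets of the order-keys that pass P, and records them in the seen set.
theorem pv_loop1 (P : String → Bool) (g : String → String) (l : List String)
    (acc : List String) (s : PySem.Set String) :
    l.foldl (fun st k => if P k then (st.1 ++ [g k], PySem.Set.add st.2 k) else st) (acc, s)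
      = (acc ++ (l.filter P).map g, PySem.Set.update s (l.filter P)) := by
  induction l generalizing acc s with
  | nil => simp [PySem.Set.update]
  | cons k t ih =>
    by_cases hP : P k = true
    · simp only [List.foldl_cons, if_pos hP, List.filter_cons_of_pos hP, List.map_cons]
      rw [ih]
      simp [PySem.Set.update, List.append_assoc]
    · simp only [List.foldl_cons, if_neg hP, List.filter_cons_of_neg (by simpa using hP)]
      exact ih acc s

-- A's second loop: skip-shaped fold is append of the bullets of the keys that do NOT satisfy Q.
theorem pv_loop2 (Q : String → Bool) (g : String → String) (l : List String) (acc : List String) :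
    l.foldl (fun ls k => if Q k then ls else ls ++ [g k]) acc
      = acc ++ (l.filter (fun k => !Q k)).map g := by
  have h : (fun (ls : List String) k => if Q k then ls else ls ++ [g k])
      = (fun ls k => if (!Q k) = true then ls ++ [g k] else ls) := by
    funext ls k; cases hq : Q k <;> simp
  rw [h, PySem.List.foldl_append_if]

-- sorted with a 2-tuple key IS sorted with the lexicographic key, for linear orders.
theorem pv_sorted2_eq_sorted {α κ₁ κ₂ : Type} [LinearOrder κ₁] [LinearOrder κ₂]
    (xs : List α) (k1 : α → κ₁) (k2 : α → κ₂) :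
    PySem.List.sorted2 xs k1 k2 false
      = PySem.List.sorted xs (fun x => toLex (k1 x, k2 x)) false := by
  have hbe : (fun (a b : α) => decide (k1 a < k1 b) || (!decide (k1 b < k1 a) && decide (k2 a < k2 b)))
      = (fun a b => decide ((fun x => toLex (k1 x, k2 x)) a < (fun x => toLex (k1 x, k2 x)) b)) := by
    funext a b
    simp only [Prod.Lex.lt_iff]
    rcases lt_trichotomy (k1 a) (k1 b) with h | h | h
    · simp [h]
    · simp [h]
    · simp [asymm h, h, ne_of_gt h]
  show List.foldl (fun acc x => PySem.List.insertBy
      (fun a b => decide (k1 a < k1 b) || (!decide (k1 b < k1 a) && decide (k2 a < k2 b))) x acc) [] xs = _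
  rw [hbe, ← PySem.List.sorted_eq_foldl_insertBy]

theorem pv_order_nodup : pvOrder.Nodup := by decide

theorem pv_rank_keys : pvRank.keys = pvOrder := by decide

theorem pv_rank_contains (k : String) : pvRank.contains k = decide (k ∈ pvOrder) := by
  rw [PySem.Dict.contains_eq_decide_mem_keys, pv_rank_keys]

theorem pv_rank_pairwise :
    pvOrder.Pairwise (fun a b => pvRank.getD a (pvOrder.length : Int) < pvRank.getD b (pvOrder.length : Int)) := by
  decide

theorem pv_rank_lt : ∀ k ∈ pvOrder,
    pvRank.getD k (pvOrder.length : Int) < (pvOrder.length : Int) := by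
  decide

theorem pv_rank_not_mem (k : String) (h : k ∉ pvOrder) :
    pvRank.getD k (pvOrder.length : Int) = (pvOrder.length : Int) := by
  apply PySem.Dict.getD_of_not_contains
  rw [pv_rank_contains]; simpa using h

-- the sort in B produces exactly A's two blocks: order-keys first (in order), the rest alphabetically.
theorem pv_main (d : PySem.Dict String String) (hnd : d.keys.Nodup) :
    PySem.List.sorted2 (d.keys.filter (fun k => d.getD k "" != ""))
        (fun k => pvRank.getD k (pvOrder.length : Int)) (fun k => k) false
      = pvOrder.filter (fun k => d.contains k && d.getD k "" != "")
        ++ (PySem.List.sorted d.keys (fun x => x) false).filter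
             (fun k => !(PySem.Set.contains
                 (PySem.Set.ofList (pvOrder.filter (fun k => d.contains k && d.getD k "" != ""))) k
               || d.getD k "" == "")) := by
  rw [pv_sorted2_eq_sorted]
  set P : String → Bool := fun k => d.contains k && d.getD k "" != "" with hPdef
  set Q : String → Bool := fun k => !(PySem.Set.contains (PySem.Set.ofList (pvOrder.filter P)) k
               || d.getD k "" == "") with hQdef
  have hPiff : ∀ k, P k = true ↔ (k ∈ d.keys ∧ d.getD k "" ≠ "") := by
    intro k
    simp [hPdef, PySem.Dict.contains_iff_mem_keys, bne_iff_ne]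
  have hQiff : ∀ k, Q k = true ↔ (¬ (k ∈ pvOrder ∧ P k = true) ∧ d.getD k "" ≠ "") := by
    intro k
    simp [hQdef, PySem.Set.contains, List.mem_filter]
    tauto
  have hmem1 : ∀ k, k ∈ pvOrder.filter P ↔ (k ∈ pvOrder ∧ k ∈ d.keys ∧ d.getD k "" ≠ "") := by
    intro k
    rw [List.mem_filter, hPiff]
  have hmem2 : ∀ k, k ∈ (PySem.List.sorted d.keys (fun x => x) false).filter Q
      ↔ (k ∈ d.keys ∧ k ∉ pvOrder ∧ d.getD k "" ≠ "") := by
    intro k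
    rw [List.mem_filter, PySem.List.mem_sorted, hQiff]
    constructor
    · rintro ⟨hk, hnin, hne⟩
      exact ⟨hk, fun hko => hnin ⟨hko, (hPiff k).mpr ⟨hk, hne⟩⟩, hne⟩
    · rintro ⟨hk, hko, hne⟩
      exact ⟨hk, fun h => hko h.1, hne⟩
  have nsorted : (PySem.List.sorted d.keys (fun x => x) false).Nodup :=
    (PySem.List.sorted_perm d.keys (fun x => x) false).nodup_iff.mpr hnd
  apply PySem.List.sorted_eq_of_perm_of_pairwise_lt
  · -- the two blocks together are a permutation of the truthy keys
    have nall : (pvOrder.filter P ++ (PySem.List.sorted d.keys (fun x => x) false).filter Q).Nodup := by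
      refine List.Nodup.append (pv_order_nodup.filter P) (nsorted.filter Q) ?_
      intro a ha hb
      exact ((hmem2 a).mp hb).2.1 ((hmem1 a).mp ha).1
    rw [List.perm_ext_iff_of_nodup nall (hnd.filter _)]
    intro a
    rw [List.mem_append, hmem1, hmem2, List.mem_filter, bne_iff_ne]
    constructor
    · rintro (⟨_, h2, h3⟩ | ⟨h1, _, h3⟩) <;> exact ⟨by assumption, by assumption⟩
    · rintro ⟨h1, h3⟩
      by_cases ho : a ∈ pvOrder
      · exact Or.inl ⟨ho, h1, h3⟩
      · exact Or.inr ⟨h1, ho, h3⟩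
  · -- the two blocks are strictly increasing under the lex key (rank, key)
    rw [List.pairwise_append]
    refine ⟨?_, ?_, ?_⟩
    · refine (pv_rank_pairwise.sublist List.filter_sublist).imp ?_
      intro a b hab
      exact Prod.Lex.lt_iff.mpr (Or.inl hab)
    · have hlt : (PySem.List.sorted d.keys (fun x => x) false).Pairwise (fun a b => a < b) :=
        ((PySem.List.sorted_pairwise d.keys (fun x => x)).and nsorted).imp
          (fun h => lt_of_le_of_ne h.1 h.2)
      refine (hlt.sublist List.filter_sublist).imp_of_mem ?_
      intro a b ha hb hab
      refine Prod.Lex.lt_iff.mpr (Or.inr ⟨?_, hab⟩)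
      rw [pv_rank_not_mem a ((hmem2 a).mp ha).2.1, pv_rank_not_mem b ((hmem2 b).mp hb).2.1]
      rfl
    · intro a ha b hb
      refine Prod.Lex.lt_iff.mpr (Or.inl ?_)
      rw [pv_rank_not_mem b ((hmem2 b).mp hb).2.1]
      exact pv_rank_lt a ((hmem1 a).mp ha).1

-- ===== VERDICT (by name: the statement is the Claim_ definition above) =====
theorem copilot_context_markdown_prefix_py_spec : Claim_equal_copilot_context_markdown_prefix_py := by
  intro ctx _
  unfold Spec_copilot_context_markdown_prefix_py
  unfold copilot_context_markdown_prefix_py copilot_context_markdown_prefix_py_alt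
  by_cases hc : ctx.isEmpty
  · simp [hc]
  · simp only [hc, Bool.false_eq_true, if_false]
    set d := PySem.Dict.ofList ctx with hd
    refine congrArg₂ (· ++ ·) ?_ rfl
    refine congrArg (PySem.Str.join "\n") ?_
    rw [pv_loop1 (fun k => d.contains k && d.getD k "" != "")
          (fun k => "- **" ++ pvLabel k ++ "**: " ++ d.getD k "") pvOrder
          ["## Copilot context (UI)", ""] PySem.Set.empty]
    rw [PySem.Set.update_empty]
    rw [pv_loop2 (fun k => PySem.Set.contains
          (PySem.Set.ofList (pvOrder.filter (fun k => d.contains k && d.getD k "" != ""))) k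
          || d.getD k "" == "")
          (fun k => "- **" ++ k ++ "**: " ++ d.getD k "")]
    rw [PySem.List.foldl_append_singleton_eq_map]
    rw [pv_main d (PySem.Dict.nodup_keys_ofList ctx), List.map_append, List.append_assoc]
    refine congrArg (fun l => ["## Copilot context (UI)", ""] ++ l) ?_
    refine congrArg₂ (· ++ ·) ?_ ?_
    · apply List.map_congr_left
      intro k hk
      have hko : k ∈ pvOrder := (List.mem_filter.mp hk).1
      rw [if_pos (by rw [pv_rank_contains]; exact decide_eq_true hko)]
    · apply List.map_congr_left
      intro k hk
      have hk' := List.mem_filter.mp hk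
      have hkeys : k ∈ d.keys := (PySem.List.mem_sorted _ _ _ k).mp hk'.1
      have hq := hk'.2
      simp only [Bool.not_eq_true', Bool.or_eq_false_iff] at hq
      have hne : d.getD k "" ≠ "" := by simpa [beq_iff_eq] using hq.2
      have hnotord : k ∉ pvOrder := by
        intro hko
        have hcontains : (PySem.Set.ofList (pvOrder.filter
            (fun k => d.contains k && d.getD k "" != ""))).contains k = true := by
          simp [PySem.Set.contains, List.mem_filter, hko,
                PySem.Dict.contains_iff_mem_keys, hkeys, bne_iff_ne, hne]
        rw [hq.1] at hcontains
        exact Bool.false_ne_true hcontains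
      rw [if_neg (by rw [pv_rank_contains]; simpa using hnotord)]
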